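-- pv_equiv track=rewrite | github.com/Ragul-SV/Data-Structures-and-Algorithms | Amazon Coding Test/Character Programming.py | getMaxDeletions
-- ===== SOURCE A (Python) =====
-- def getMaxDeletions(s):
--     d = [0,0,0,0]
--     for i in s:
--         if i == 'U':
--             d[0]+=1
--         elif i == 'D':
--             d[1]+=1
--         elif i == 'L':
--             d[2]+=1
--         elif i == 'R':
--             d[3]+=1
--     return min(d[0],d[1])*2 + min(d[2],d[3])*2
-- ===== SOURCE B (Python) =====
-- def getMaxDeletions(s):
--     # greedy online pairing: each char cancels a pending opposite (deleting both)
--     # or becomes pending itself; total deleted is accumulated directly.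
--     pu = pd = pl = pr = 0
--     deleted = 0
--     for ch in s:
--         if ch == 'U':
--             if pd > 0:
--                 pd -= 1
--                 deleted += 2
--             else:
--                 pu += 1
--         elif ch == 'D':
--             if pu > 0:
--                 pu -= 1
--                 deleted += 2
--             else:
--                 pd += 1
--         elif ch == 'L':
--             if pr > 0:
--                 pr -= 1
--                 deleted += 2
--             else:
--                 pl += 1
--         elif ch == 'R':
--             if pl > 0:
--                 pl -= 1
--                 deleted += 2
--             else:
--                 pr += 1
--     return deleted
-- ===== Notes on version B (the rewrite author's own statement) =====
-- stated objective: alternative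
-- what changed: Replaced count-then-min arithmetic by a greedy online pairing: each character either cancels a pending opposite (adding 2 to a running deletion total) or becomes pending, so the answer is accumulated directly with no min at the end.
import Mathlib
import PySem

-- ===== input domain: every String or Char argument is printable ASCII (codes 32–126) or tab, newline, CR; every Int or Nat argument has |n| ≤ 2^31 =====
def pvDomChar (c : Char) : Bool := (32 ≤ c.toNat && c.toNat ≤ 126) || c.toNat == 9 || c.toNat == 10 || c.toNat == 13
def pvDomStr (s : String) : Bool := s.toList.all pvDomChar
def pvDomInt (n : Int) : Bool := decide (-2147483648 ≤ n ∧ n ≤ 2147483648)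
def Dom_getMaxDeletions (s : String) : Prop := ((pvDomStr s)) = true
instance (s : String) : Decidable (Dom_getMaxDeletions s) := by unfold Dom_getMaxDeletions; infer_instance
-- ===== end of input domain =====

-- B replaces A's count-then-min computation by a greedy online pairing with a running deletion total (alternative algorithm, same cost).

-- ===== PORT A =====
-- the loop body of A: d = [0,0,0,0] kept as a 4-tuple of Ints, the elif chain in order
def stepA (d : Int × Int × Int × Int) (i : Char) : Int × Int × Int × Int :=
  if i == 'U' then (d.1 + 1, d.2.1, d.2.2.1, d.2.2.2)
  else if i == 'D' then (d.1, d.2.1 + 1, d.2.2.1, d.2.2.2)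
  else if i == 'L' then (d.1, d.2.1, d.2.2.1 + 1, d.2.2.2)
  else if i == 'R' then (d.1, d.2.1, d.2.2.1, d.2.2.2 + 1)
  else d

def getMaxDeletions (s : String) : Int :=
  let d := s.toList.foldl stepA (0, 0, 0, 0)
  min d.1 d.2.1 * 2 + min d.2.2.1 d.2.2.2 * 2

-- ===== PORT B =====
-- B's loop body: state (pu, pd, pl, pr, deleted), greedy cancellation of pending opposites
def stepB (st : Int × Int × Int × Int × Int) (ch : Char) : Int × Int × Int × Int × Int :=
  let (pu, pd, pl, pr, del) := st
  if ch == 'U' then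
    if pd > 0 then (pu, pd - 1, pl, pr, del + 2) else (pu + 1, pd, pl, pr, del)
  else if ch == 'D' then
    if pu > 0 then (pu - 1, pd, pl, pr, del + 2) else (pu, pd + 1, pl, pr, del)
  else if ch == 'L' then
    if pr > 0 then (pu, pd, pl, pr - 1, del + 2) else (pu, pd, pl + 1, pr, del)
  else if ch == 'R' then
    if pl > 0 then (pu, pd, pl - 1, pr, del + 2) else (pu, pd, pl, pr + 1, del)
  else st

def getMaxDeletions_alt (s : String) : Int :=
  (s.toList.foldl stepB (0, 0, 0, 0, 0)).2.2.2.2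

-- ===== PRECONDITION & SPEC =====
def Spec_getMaxDeletions (s : String) (out : Int) : Prop := out = getMaxDeletions_alt s
instance (s : String) (out : Int) : Decidable (Spec_getMaxDeletions s out) := by unfold Spec_getMaxDeletions; infer_instance

-- ===== CLAIM (what is proved, stated in full; the proofs are below) =====
def Claim_equal_getMaxDeletions : Prop := ∀ (s : String), Dom_getMaxDeletions s → Spec_getMaxDeletions s (getMaxDeletions s)

-- ===== LEMMAS AND PROOFS =====

-- invariant of A's binning fold: the 4-tuple is the running character counts
theorem foldA_eq (l : List Char) : ∀ (a b cL cR : Int),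
    l.foldl stepA (a, b, cL, cR)
      = (a + l.count 'U', b + l.count 'D', cL + l.count 'L', cR + l.count 'R') := by
  induction l with
  | nil => intro a b cL cR; simp
  | cons h t ih =>
    intro a b cL cR
    rw [List.foldl_cons]
    by_cases hU : h = 'U'
    · subst hU
      rw [show stepA (a, b, cL, cR) 'U' = (a + 1, b, cL, cR) from rfl, ih]
      simp [Prod.ext_iff]; omega
    · by_cases hD : h = 'D'
      · subst hD
        rw [show stepA (a, b, cL, cR) 'D' = (a, b + 1, cL, cR) from rfl, ih]
        simp [Prod.ext_iff]; omega
      · by_cases hL : h = 'L'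
        · subst hL
          rw [show stepA (a, b, cL, cR) 'L' = (a, b, cL + 1, cR) from rfl, ih]
          simp [Prod.ext_iff]; omega
        · by_cases hR : h = 'R'
          · subst hR
            rw [show stepA (a, b, cL, cR) 'R' = (a, b, cL, cR + 1) from rfl, ih]
            simp [Prod.ext_iff]; omega
          · have e : stepA (a, b, cL, cR) h = (a, b, cL, cR) := by
              simp [stepA, beq_false_of_ne hU, beq_false_of_ne hD,
                beq_false_of_ne hL, beq_false_of_ne hR]
            rw [e, ih]
            simp [List.count_cons, beq_false_of_ne hU, beq_false_of_ne hD,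
              beq_false_of_ne hL, beq_false_of_ne hR]

-- invariant of B's greedy fold: pending counts are the positive parts of the
-- count differences, and deleted accumulates 2·min per axis
theorem foldB_eq (l : List Char) : ∀ (pu pd pl pr del : Int),
    0 ≤ pu → 0 ≤ pd → 0 ≤ pl → 0 ≤ pr → min pu pd = 0 → min pl pr = 0 →
    l.foldl stepB (pu, pd, pl, pr, del)
      = (max (pu + l.count 'U' - (pd + l.count 'D')) 0,
         max (pd + l.count 'D' - (pu + l.count 'U')) 0,
         max (pl + l.count 'L' - (pr + l.count 'R')) 0,
         max (pr + l.count 'R' - (pl + l.count 'L')) 0,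
         del + 2 * min (pu + l.count 'U') (pd + l.count 'D')
             + 2 * min (pl + l.count 'L') (pr + l.count 'R')) := by
  induction l with
  | nil =>
    intro pu pd pl pr del h1 h2 h3 h4 h5 h6
    simp [Prod.ext_iff]; omega
  | cons h t ih =>
    intro pu pd pl pr del h1 h2 h3 h4 h5 h6
    rw [List.foldl_cons]
    by_cases hU : h = 'U'
    · subst hU
      by_cases hp : pd > 0
      · have e : stepB (pu, pd, pl, pr, del) 'U' = (pu, pd - 1, pl, pr, del + 2) := by
          simp [stepB, hp]
        rw [e, ih pu (pd - 1) pl pr (del + 2) h1 (by omega) h3 h4 (by omega) h6]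
        simp [Prod.ext_iff]; omega
      · have e : stepB (pu, pd, pl, pr, del) 'U' = (pu + 1, pd, pl, pr, del) := by
          simp [stepB, hp]
        rw [e, ih (pu + 1) pd pl pr del (by omega) h2 h3 h4 (by omega) h6]
        simp [Prod.ext_iff]; omega
    · by_cases hD : h = 'D'
      · subst hD
        by_cases hp : pu > 0
        · have e : stepB (pu, pd, pl, pr, del) 'D' = (pu - 1, pd, pl, pr, del + 2) := by
            simp [stepB, hp]
          rw [e, ih (pu - 1) pd pl pr (del + 2) (by omega) h2 h3 h4 (by omega) h6]
          simp [Prod.ext_iff]; omega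
        · have e : stepB (pu, pd, pl, pr, del) 'D' = (pu, pd + 1, pl, pr, del) := by
            simp [stepB, hp]
          rw [e, ih pu (pd + 1) pl pr del h1 (by omega) h3 h4 (by omega) h6]
          simp [Prod.ext_iff]; omega
      · by_cases hL : h = 'L'
        · subst hL
          by_cases hp : pr > 0
          · have e : stepB (pu, pd, pl, pr, del) 'L' = (pu, pd, pl, pr - 1, del + 2) := by
              simp [stepB, hp]
            rw [e, ih pu pd pl (pr - 1) (del + 2) h1 h2 h3 (by omega) h5 (by omega)]
            simp [Prod.ext_iff]; omega
          · have e : stepB (pu, pd, pl, pr, del) 'L' = (pu, pd, pl + 1, pr, del) := by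
              simp [stepB, hp]
            rw [e, ih pu pd (pl + 1) pr del h1 h2 (by omega) h4 h5 (by omega)]
            simp [Prod.ext_iff]; omega
        · by_cases hR : h = 'R'
          · subst hR
            by_cases hp : pl > 0
            · have e : stepB (pu, pd, pl, pr, del) 'R' = (pu, pd, pl - 1, pr, del + 2) := by
                simp [stepB, hp]
              rw [e, ih pu pd (pl - 1) pr (del + 2) h1 h2 (by omega) h4 h5 (by omega)]
              simp [Prod.ext_iff]; omega
            · have e : stepB (pu, pd, pl, pr, del) 'R' = (pu, pd, pl, pr + 1, del) := by
                simp [stepB, hp]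
              rw [e, ih pu pd pl (pr + 1) del h1 h2 h3 (by omega) h5 (by omega)]
              simp [Prod.ext_iff]; omega
          · have e : stepB (pu, pd, pl, pr, del) h = (pu, pd, pl, pr, del) := by
              simp [stepB, beq_false_of_ne hU, beq_false_of_ne hD,
                beq_false_of_ne hL, beq_false_of_ne hR]
            rw [e, ih pu pd pl pr del h1 h2 h3 h4 h5 h6]
            simp [List.count_cons, beq_false_of_ne hU, beq_false_of_ne hD,
              beq_false_of_ne hL, beq_false_of_ne hR]

-- ===== VERDICT (by name: the statement is the Claim_ definition above) =====
theorem getMaxDeletions_spec : Claim_equal_getMaxDeletions := by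
  intro s _
  unfold Spec_getMaxDeletions getMaxDeletions getMaxDeletions_alt
  rw [foldA_eq, foldB_eq s.toList 0 0 0 0 0 le_rfl le_rfl le_rfl le_rfl (by simp) (by simp)]
  simp
  ring
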